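-- pv_equiv track=rewrite | github.com/MattLeho/ASCII-Terminal-Screensaver | animations/utils/text_render.py | get_text_mask
-- ===== SOURCE A (Python) =====
-- FONT_5x3 = {
--     '0': ["███", "█ █", "█ █", "█ █", "███"],
--     '1': [" █ ", "██ ", " █ ", " █ ", "███"],
--     '2': ["███", "  █", "███", "█  ", "███"],
--     '3': ["███", "  █", "███", "  █", "███"],
--     '4': ["█ █", "█ █", "███", "  █", "  █"],
--     '5': ["███", "█  ", "███", "  █", "███"],
--     '6': ["███", "█  ", "███", "█ █", "███"],
--     '7': ["███", "  █", "  █", "  █", "  █"],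
--     '8': ["███", "█ █", "███", "█ █", "███"],
--     '9': ["███", "█ █", "███", "  █", "███"],
--     ':': ["   ", " █ ", "   ", " █ ", "   "],
--     '-': ["   ", "   ", "███", "   ", "   "],
--     '/': ["  █", " █ ", " █ ", " █ ", "█  "],
--     ' ': ["   ", "   ", "   ", "   ", "   "],
--     '.': ["   ", "   ", "   ", "   ", " █ "],
--     'A': ["███", "█ █", "███", "█ █", "█ █"],
--     'P': ["███", "█ █", "███", "█  ", "█  "],
--     'M': ["█ █", "███", "█ █", "█ █", "█ █"],
-- }
--
-- def get_text_width(text, font=None):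
--     """
--     Calculate the total width of a string in block characters.
--
--     Args:
--         text: String to measure
--         font: Font dictionary to use (default: FONT_5x3)
--
--     Returns:
--         Width in terminal columns
--     """
--     if font is None:
--         font = FONT_5x3
--
--     width = 0
--     for char in str(text):
--         if char in font:
--             # Width of character + 1 space
--             width += len(font[char][0]) + 1
--         else:
--             width += 2  # Unknown char = small space
--
--     return max(0, width - 1)  # Remove trailing space
--
-- def get_text_height(font=None):
--     """Get height of font in rows."""
--     if font is None:
--         font = FONT_5x3
--     # All chars should be same height, get from '0'
--     return len(font.get('0', [''] * 5))
--
-- def get_text_mask(text, font=None):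
--     """
--     Generate a 2D boolean mask for text (used for Matrix Clock effect).
--
--     Args:
--         text: String to convert to mask
--         font: Font dictionary
--
--     Returns:
--         List of lists (rows x cols) where True = filled pixel
--     """
--     if font is None:
--         font = FONT_5x3
--
--     text_width = get_text_width(text, font)
--     text_height = get_text_height(font)
--
--     # Initialize empty mask
--     mask = [[False] * text_width for _ in range(text_height)]
--
--     cursor_x = 0
--     for character in str(text):
--         if character in font:
--             grid = font[character]
--             char_width = len(grid[0]) if grid else 0
--
--             for row_idx, row_str in enumerate(grid):
--                 for col_idx, pixel in enumerate(row_str):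
--                     if pixel != ' ' and cursor_x + col_idx < text_width:
--                         mask[row_idx][cursor_x + col_idx] = True
--
--             cursor_x += char_width + 1
--         else:
--             cursor_x += 2
--
--     return mask
-- ===== SOURCE B (Python) =====
-- FONT_5x3 = {
--     '0': ["███", "█ █", "█ █", "█ █", "███"],
--     '1': [" █ ", "██ ", " █ ", " █ ", "███"],
--     '2': ["███", "  █", "███", "█  ", "███"],
--     '3': ["███", "  █", "███", "  █", "███"],
--     '4': ["█ █", "█ █", "███", "  █", "  █"],
--     '5': ["███", "█  ", "███", "  █", "███"],
--     '6': ["███", "█  ", "███", "█ █", "███"],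
--     '7': ["███", "  █", "  █", "  █", "  █"],
--     '8': ["███", "█ █", "███", "█ █", "███"],
--     '9': ["███", "█ █", "███", "  █", "███"],
--     ':': ["   ", " █ ", "   ", " █ ", "   "],
--     '-': ["   ", "   ", "███", "   ", "   "],
--     '/': ["  █", " █ ", " █ ", " █ ", "█  "],
--     ' ': ["   ", "   ", "   ", "   ", "   "],
--     '.': ["   ", "   ", "   ", "   ", " █ "],
--     'A': ["███", "█ █", "███", "█ █", "█ █"],
--     'P': ["███", "█ █", "███", "█  ", "█  "],
--     'M': ["█ █", "███", "█ █", "█ █", "█ █"],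
-- }
--
-- def _piece(font, r, ch):
--     """Row r of character ch followed by its separator space ('  ' for unknown chars)."""
--     if ch in font:
--         grid = font[ch]
--         width = len(grid[0])
--         row = grid[r] if r < len(grid) else ''
--         return row.ljust(width) + ' '
--     return '  '
--
-- def get_text_mask(text, font=None):
--     """Row-major: for each font row, concatenate that row of every character's glyph
--     (plus separator), drop the trailing separator column, and binarize the string."""
--     if font is None:
--         font = FONT_5x3
--     height = len(font.get('0', [''] * 5))
--     s = str(text)
--     return [[c != ' ' for c in ''.join(_piece(font, r, ch) for ch in s)[:-1]]
--             for r in range(height)]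
-- ===== Notes on version B (the rewrite author's own statement) =====
-- stated objective: alternative
-- what changed: Inverts the loop nesting: instead of preallocating a 2D mask and mutating it per character through a cursor with per-pixel bounds guards, B builds each output row independently by concatenating that row of every character's glyph (padded to the glyph width, plus separator), drops the trailing separator column with [:-1], and binarizes the string.
-- outside the precondition, e.g. on get_text_mask('a', {'0': ['#'], 'a': ['#', ' ']}): A returns [[True]], B returns [[True]]
import Mathlib
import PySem

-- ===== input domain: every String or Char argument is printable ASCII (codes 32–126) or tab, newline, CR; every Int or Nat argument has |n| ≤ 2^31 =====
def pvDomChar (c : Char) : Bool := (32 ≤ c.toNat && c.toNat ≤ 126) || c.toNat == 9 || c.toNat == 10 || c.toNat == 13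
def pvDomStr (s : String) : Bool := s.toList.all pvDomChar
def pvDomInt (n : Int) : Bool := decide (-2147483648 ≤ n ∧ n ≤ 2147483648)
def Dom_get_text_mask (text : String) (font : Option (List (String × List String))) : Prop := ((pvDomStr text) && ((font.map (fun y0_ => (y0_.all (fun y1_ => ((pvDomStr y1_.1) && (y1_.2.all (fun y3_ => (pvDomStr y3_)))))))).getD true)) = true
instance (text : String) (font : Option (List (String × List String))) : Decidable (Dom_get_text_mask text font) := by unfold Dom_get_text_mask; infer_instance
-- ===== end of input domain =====

-- B inverts the loop nesting: each output row is built independently by concatenating that row of every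
-- character's glyph (padded, plus separator), trimming the trailing column, and binarizing ("alternative").

-- shared module constant FONT_5x3 (a dict literal in the Python module)
def pvFONT : List (String × List String) :=
  [("0", ["███", "█ █", "█ █", "█ █", "███"]),
   ("1", [" █ ", "██ ", " █ ", " █ ", "███"]),
   ("2", ["███", "  █", "███", "█  ", "███"]),
   ("3", ["███", "  █", "███", "  █", "███"]),
   ("4", ["█ █", "█ █", "███", "  █", "  █"]),
   ("5", ["███", "█  ", "███", "  █", "███"]),
   ("6", ["███", "█  ", "███", "█ █", "███"]),
   ("7", ["███", "  █", "  █", "  █", "  █"]),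
   ("8", ["███", "█ █", "███", "█ █", "███"]),
   ("9", ["███", "█ █", "███", "  █", "███"]),
   (":", ["   ", " █ ", "   ", " █ ", "   "]),
   ("-", ["   ", "   ", "███", "   ", "   "]),
   ("/", ["  █", " █ ", " █ ", " █ ", "█  "]),
   (" ", ["   ", "   ", "   ", "   ", "   "]),
   (".", ["   ", "   ", "   ", "   ", " █ "]),
   ("A", ["███", "█ █", "███", "█ █", "█ █"]),
   ("P", ["███", "█ █", "███", "█  ", "█  "]),
   ("M", ["█ █", "███", "█ █", "█ █", "█ █"])]

-- ===== PORT A =====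
-- width += len(font[char][0]) + 1  — font[char][0] raises IndexError on an empty grid (excluded by Pre_);
-- PySem.List.pyGetD grid 0 "" is exact there.
def pvWidthStep (f : PySem.Dict String (List String)) (w : Int) (c : Char) : Int :=
  match f.get? (String.ofList [c]) with
  | some g => w + PySem.Str.len (PySem.List.pyGetD g 0 "") + 1
  | none => w + 2

-- get_text_width(text, font)
def pvTextWidth (text : List Char) (f : PySem.Dict String (List String)) : Int :=
  max 0 ((text.foldl (pvWidthStep f) 0) - 1)

-- get_text_height(font) = len(font.get('0', [''] * 5))
def pvTextHeight (f : PySem.Dict String (List String)) : Int :=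
  ((f.getD "0" ["", "", "", "", ""]).length : Int)

-- mask[r][x] = True  (in-range under Pre_; Python raises out of range, excluded by Pre_)
def pvSet2d (m : List (List Bool)) (r x : Nat) : List (List Bool) :=
  m.set r ((m.getD r []).set x true)

-- the two nested enumerate-loops writing one character's grid at cursor_x
def pvCharWrite (W : Int) (cursor : Int) (grid : List String) (mask : List (List Bool)) : List (List Bool) :=
  (PySem.List.enumerate grid 0).foldl (fun mask rc =>
    (PySem.List.enumerate rc.2.toList 0).foldl (fun mask cp =>
      if cp.2 ≠ ' ' ∧ cursor + cp.1 < W then pvSet2d mask rc.1.toNat (cursor + cp.1).toNat else mask)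
      mask) mask

-- one iteration of A's main loop, state = (mask, cursor_x)
def pvAStep (f : PySem.Dict String (List String)) (W : Int)
    (st : List (List Bool) × Int) (c : Char) : List (List Bool) × Int :=
  match f.get? (String.ofList [c]) with
  | some grid =>
      let char_width : Int := if grid ≠ [] then PySem.Str.len (PySem.List.pyGetD grid 0 "") else 0
      (pvCharWrite W st.2 grid st.1, st.2 + char_width + 1)
  | none => (st.1, st.2 + 2)

def get_text_mask (text : String) (font : Option (List (String × List String))) : List (List Bool) :=
  let f := PySem.Dict.mk (font.getD pvFONT)
  let W := pvTextWidth text.toList f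
  let H := pvTextHeight f
  let mask := List.replicate H.toNat (List.replicate W.toNat false)
  (text.toList.foldl (pvAStep f W) (mask, 0)).1

-- ===== PORT B =====
-- grid row r of one known glyph, left-justified to the glyph width (ljust pads, never truncates)
-- grid[r] if r < len(grid) else ''
def pvRowOf (g : List String) (r : Int) : List Char :=
  if r < (g.length : Int) then (PySem.List.pyGetD g r "").toList else []

-- left-justified to the glyph width w = len(grid[0]) (ljust pads, never truncates;
-- len(grid[0]) raises on an empty grid, excluded by Pre_), plus the separator space
def pvPieceG (g : List String) (r : Int) : List Char :=
  (pvRowOf g r ++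
    List.replicate ((PySem.Str.len (PySem.List.pyGetD g 0 "")).toNat - (pvRowOf g r).length) ' ') ++ [' ']

-- _piece(font, r, ch): row r of ch plus its separator space ('  ' for unknown chars)
def pvPiece (f : PySem.Dict String (List String)) (r : Int) (ch : Char) : List Char :=
  match f.get? (String.ofList [ch]) with
  | some g => pvPieceG g r
  | none => [' ', ' ']

def get_text_mask_alt (text : String) (font : Option (List (String × List String))) : List (List Bool) :=
  let f := PySem.Dict.mk (font.getD pvFONT)
  let H : Int := ((f.getD "0" ["", "", "", "", ""]).length : Int)
  let cs := text.toList
  (PySem.List.pyRange 0 H 1).map (fun r =>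
    let line := cs.flatMap (pvPiece f r)          -- ''.join(_piece(font, r, ch) for ch in s)
    (line.take (line.length - 1)).map (fun c => decide (c ≠ ' ')))   -- [c != ' ' for c in line[:-1]]

-- ===== PRECONDITION & SPEC =====
-- Pre_ excludes inputs where some character of text maps in the effective font to an empty grid (A raises
-- IndexError), to a grid taller than the font height (A usually raises IndexError; where every overtall row
-- happens to write nothing A returns — an artefact, see the cited example), or to a ragged grid with a row
-- wider than its first row (A's overlapping cursor writes there are an accident of the mutation scheme).
def Pre_get_text_mask (text : String) (font : Option (List (String × List String))) : Prop :=
  (text.toList.all fun c =>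
    match (PySem.Dict.mk (font.getD pvFONT)).get? (String.ofList [c]) with
    | some g => !g.isEmpty &&
        decide (g.length ≤ ((PySem.Dict.mk (font.getD pvFONT)).getD "0" ["", "", "", "", ""]).length) &&
        g.all (fun s => decide (s.toList.length ≤ (PySem.List.pyGetD g 0 "").toList.length))
    | none => true) = true
instance (text : String) (font : Option (List (String × List String))) : Decidable (Pre_get_text_mask text font) := by unfold Pre_get_text_mask; infer_instance

def pvWitness_get_text_mask : String × (Option (List (String × List String))) := ("1", none)

def Spec_get_text_mask (text : String) (font : Option (List (String × List String))) (out : List (List Bool)) : Prop := out = get_text_mask_alt text font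
instance (text : String) (font : Option (List (String × List String))) (out : List (List Bool)) : Decidable (Spec_get_text_mask text font out) := by unfold Spec_get_text_mask; infer_instance

-- ===== CLAIM (what is proved, stated in full; the proofs are below) =====
def Claim_equal_get_text_mask : Prop := ∀ (text : String) (font : Option (List (String × List String))), Dom_get_text_mask text font → Pre_get_text_mask text font → Spec_get_text_mask text font (get_text_mask text font)

-- ===== LEMMAS AND PROOFS =====

-- mask[r][x] as A's Python reads it (total form; all accesses in the proof are in range)
def pvGet2 (m : List (List Bool)) (r x : Nat) : Bool := (m.getD r []).getD x false

-- the mask keeps its Hn × Wn shape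
def pvShape (Hn Wn : Nat) (m : List (List Bool)) : Prop :=
  m.length = Hn ∧ ∀ row ∈ m, row.length = Wn

-- the per-character precondition on the effective font (the body of Pre_)
def pvPreC (f : PySem.Dict String (List String)) (Hn : Nat) (c : Char) : Bool :=
  match f.get? (String.ofList [c]) with
  | some g => !g.isEmpty && decide (g.length ≤ Hn) &&
      g.all (fun s => decide (s.toList.length ≤ (PySem.List.pyGetD g 0 "").toList.length))
  | none => true

lemma pvGetD_set_row (row : List Bool) (x x' : Nat) (hx' : x' < row.length) :
    (row.set x true).getD x' false = if x' = x then true else row.getD x' false := by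
  by_cases h : x' = x
  · subst h
    simp [List.getD_eq_getElem?_getD, hx']
  · simp [List.getD_eq_getElem?_getD, h, Ne.symm h]

lemma pvShape_set2d (Hn Wn : Nat) (m : List (List Bool)) (r x : Nat)
    (h : pvShape Hn Wn m) : pvShape Hn Wn (pvSet2d m r x) := by
  obtain ⟨hlen, hrow⟩ := h
  refine ⟨by simpa [pvSet2d] using hlen, ?_⟩
  intro row hmem
  by_cases hrl : r < m.length
  · rcases List.mem_or_eq_of_mem_set hmem with h1 | h1
    · exact hrow row h1
    · subst h1
      rw [List.length_set, List.getD_eq_getElem m [] hrl]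
      exact hrow _ (List.getElem_mem hrl)
  · rw [pvSet2d, List.set_eq_of_length_le (by omega)] at hmem
    exact hrow row hmem

lemma pvGet2_set2d (Hn Wn : Nat) (m : List (List Bool))
    (h : pvShape Hn Wn m)
    (r x r' x' : Nat) (hr' : r' < Hn) (hx' : x' < Wn) :
    pvGet2 (pvSet2d m r x) r' x' = if r' = r ∧ x' = x then true else pvGet2 m r' x' := by
  obtain ⟨hlen, hrow⟩ := h
  by_cases hrr : r' = r
  · subst hrr
    have hrl : r' < m.length := hlen ▸ hr'
    have hget : (m.set r' ((m.getD r' []).set x true)).getD r' [] = (m.getD r' []).set x true := by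
      simp [List.getD_eq_getElem?_getD, hrl]
    have hWn : (m.getD r' []).length = Wn := by
      rw [List.getD_eq_getElem m [] hrl]
      exact hrow _ (List.getElem_mem hrl)
    simp only [pvGet2, pvSet2d, hget, true_and]
    exact pvGetD_set_row _ x x' (hWn ▸ hx')
  · have hne : r ≠ r' := fun h => hrr h.symm
    have hget : (m.set r ((m.getD r []).set x true)).getD r' [] = m.getD r' [] := by
      simp [List.getD_eq_getElem?_getD, hne]
    simp only [pvGet2, pvSet2d, hget]
    simp [hrr]

-- a list of blanks reads blank
lemma pvGetD_blank (l : List Char) (k : Nat) (h : ∀ x ∈ l, x = ' ') : l.getD k ' ' = ' ' := by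
  rw [List.getD_eq_getElem?_getD]
  cases hk : l[k]? with
  | none => rfl
  | some c => simp [h c (List.mem_of_getElem? hk)]

-- inner loop: writing one grid row (row index ρ) pointwise
lemma pvInnerL (Hn Wn : Nat) (cur ρ : Int) (hcur : 0 ≤ cur) (chars : List Char) :
    ∀ (s : Int), 0 ≤ s → ∀ m, pvShape Hn Wn m →
    pvShape Hn Wn ((PySem.List.enumerate chars s).foldl (fun mask cp =>
        if cp.2 ≠ ' ' ∧ cur + cp.1 < (Wn : Int) then pvSet2d mask ρ.toNat (cur + cp.1).toNat else mask) m) ∧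
    ∀ (r x : Nat), r < Hn → x < Wn →
    pvGet2 ((PySem.List.enumerate chars s).foldl (fun mask cp =>
        if cp.2 ≠ ' ' ∧ cur + cp.1 < (Wn : Int) then pvSet2d mask ρ.toNat (cur + cp.1).toNat else mask) m) r x
      = if r = ρ.toNat ∧ cur + s ≤ (x : Int) ∧ (x : Int) < cur + s + chars.length ∧
           chars.getD ((x : Int) - (cur + s)).toNat ' ' ≠ ' ' then true else pvGet2 m r x := by
    induction chars with
  | nil =>
    intro s hs m hm
    refine ⟨by simpa [PySem.List.enumerate_nil] using hm, ?_⟩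
    intro r x hr hx
    rw [PySem.List.enumerate_nil]
    simp only [List.foldl_nil, List.length_nil, Nat.cast_zero, add_zero]
    rw [if_neg]
    rintro ⟨-, h1, h2, -⟩; omega
  | cons p ps ih =>
    intro s hs m hm
    rw [PySem.List.enumerate_cons]
    simp only [List.foldl_cons]
    set m1 := if p ≠ ' ' ∧ cur + s < (Wn : Int) then pvSet2d m ρ.toNat (cur + s).toNat else m with hm1
    have hm1s : pvShape Hn Wn m1 := by
      rw [hm1]; split_ifs
      · exact pvShape_set2d _ _ _ _ _ hm
      · exact hm
    obtain ⟨hsh, hpt⟩ := ih (s + 1) (by omega) m1 hm1s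
    refine ⟨hsh, ?_⟩
    intro r x hr hx
    rw [hpt r x hr hx]
    have hneq : (x : Int) ≠ cur + s → pvGet2 m1 r x = pvGet2 m r x := by
      intro hne
      rw [hm1]; split_ifs with hgd
      · rw [pvGet2_set2d Hn Wn m hm _ _ r x hr hx, if_neg]
        rintro ⟨-, hxt⟩; omega
      · rfl
    by_cases hxe : (x : Int) = cur + s
    · rw [if_neg (by rintro ⟨-, h1, -⟩; omega)]
      have hidx : ((x : Int) - (cur + s)).toNat = 0 := by omega
      by_cases hp : p = ' '
      · rw [hm1, if_neg (by simp [hp])]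
        rw [if_neg]
        rintro ⟨-, -, -, hbit⟩
        rw [hidx] at hbit
        simp [hp] at hbit
      · have hWx : cur + s < (Wn : Int) := by omega
        rw [hm1, if_pos ⟨hp, hWx⟩]
        rw [pvGet2_set2d Hn Wn m hm _ _ r x hr hx]
        have hxt : x = (cur + s).toNat := by omega
        by_cases hrρ : r = ρ.toNat
        · rw [if_pos ⟨hrρ, hxt⟩, if_pos]
          refine ⟨hrρ, by omega, ?_, ?_⟩
          · simp only [List.length_cons]; push_cast; omega
          · rw [hidx]; simpa using hp
        · rw [if_neg (by tauto), if_neg (by tauto)]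
    · by_cases hlt : (x : Int) < cur + s
      · rw [if_neg (by rintro ⟨-, h1, -⟩; omega), hneq hxe,
          if_neg (by rintro ⟨-, h1, -⟩; omega)]
      · have hge : cur + s + 1 ≤ (x : Int) := by omega
        rw [hneq hxe]
        refine if_congr ?_ rfl rfl
        have hidx : ((x : Int) - (cur + s)).toNat = ((x : Int) - (cur + (s + 1))).toNat + 1 := by omega
        constructor
        · rintro ⟨h1, h2, h3, h4⟩
          refine ⟨h1, by omega, by simp only [List.length_cons]; push_cast; omega, ?_⟩
          rw [hidx, List.getD_cons_succ]; exact h4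
        · rintro ⟨h1, h2, h3, h4⟩
          rw [hidx, List.getD_cons_succ] at h4
          refine ⟨h1, by omega, by simp only [List.length_cons] at h3; push_cast at h3; omega, h4⟩

-- middle loop: writing a whole grid at cursor cur pointwise
lemma pvRowsL (Hn Wn : Nat) (cur : Int) (hcur : 0 ≤ cur) (grid : List String) :
    ∀ (s : Int), 0 ≤ s → ∀ m, pvShape Hn Wn m →
    pvShape Hn Wn ((PySem.List.enumerate grid s).foldl (fun mask rc =>
      (PySem.List.enumerate rc.2.toList 0).foldl (fun mask cp =>
        if cp.2 ≠ ' ' ∧ cur + cp.1 < (Wn : Int) then pvSet2d mask rc.1.toNat (cur + cp.1).toNat else mask)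
        mask) m) ∧
    ∀ (r x : Nat), r < Hn → x < Wn →
    pvGet2 ((PySem.List.enumerate grid s).foldl (fun mask rc =>
      (PySem.List.enumerate rc.2.toList 0).foldl (fun mask cp =>
        if cp.2 ≠ ' ' ∧ cur + cp.1 < (Wn : Int) then pvSet2d mask rc.1.toNat (cur + cp.1).toNat else mask)
        mask) m) r x
      = if s ≤ (r : Int) ∧ (r : Int) < s + grid.length ∧ cur ≤ (x : Int) ∧
           (x : Int) < cur + (grid.getD ((r : Int) - s).toNat "").toList.length ∧
           (grid.getD ((r : Int) - s).toNat "").toList.getD ((x : Int) - cur).toNat ' ' ≠ ' '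
        then true else pvGet2 m r x := by
    induction grid with
  | nil =>
    intro s hs m hm
    refine ⟨by simpa [PySem.List.enumerate_nil] using hm, ?_⟩
    intro r x hr hx
    rw [PySem.List.enumerate_nil]
    simp only [List.foldl_nil, List.length_nil, Nat.cast_zero, add_zero]
    rw [if_neg]
    rintro ⟨h1, h2, -⟩; omega
  | cons g grid ih =>
    intro s hs m hm
    rw [PySem.List.enumerate_cons]
    simp only [List.foldl_cons]
    obtain ⟨hsh1, hpt1⟩ := pvInnerL Hn Wn cur s hcur g.toList 0 le_rfl m hm
    obtain ⟨hsh, hpt⟩ := ih (s + 1) (by omega) _ hsh1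
    refine ⟨hsh, ?_⟩
    intro r x hr hx
    rw [hpt r x hr hx]
    by_cases hre : (r : Int) = s
    · rw [if_neg (by rintro ⟨h1, -⟩; omega)]
      rw [hpt1 r x hr hx]
      have hr0 : ((r : Int) - s).toNat = 0 := by omega
      have hrt : r = s.toNat := by omega
      refine if_congr ?_ rfl rfl
      rw [hr0]
      simp only [List.getD_cons_zero, add_zero, List.length_cons]
      constructor
      · rintro ⟨-, h2, h3, h4⟩
        exact ⟨by omega, by push_cast; omega, by omega, h3, h4⟩
      · rintro ⟨-, -, h2, h3, h4⟩
        exact ⟨hrt, by omega, h3, h4⟩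
    · have hm1 : pvGet2 ((PySem.List.enumerate g.toList 0).foldl (fun mask cp =>
          if cp.2 ≠ ' ' ∧ cur + cp.1 < (Wn : Int) then pvSet2d mask s.toNat (cur + cp.1).toNat else mask) m) r x
          = pvGet2 m r x := by
        rw [hpt1 r x hr hx, if_neg]
        rintro ⟨h1, -⟩; omega
      rw [hm1]
      by_cases hlt : (r : Int) < s
      · rw [if_neg (by rintro ⟨h1, -⟩; omega), if_neg (by rintro ⟨h1, -⟩; omega)]
      · have hge : s + 1 ≤ (r : Int) := by omega
        refine if_congr ?_ rfl rfl
        have hidx : ((r : Int) - s).toNat = ((r : Int) - (s + 1)).toNat + 1 := by omega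
        rw [hidx, List.getD_cons_succ]
        simp only [List.length_cons]
        constructor
        · rintro ⟨-, h2, h3⟩
          exact ⟨by omega, by omega, h3⟩
        · rintro ⟨-, h2, h3⟩
          exact ⟨by omega, by omega, h3⟩

-- one known character: A's guarded double loop equals B's padded piece, pointwise
lemma pvCharL (Hn Wn : Nat) (cur : Int) (hcur : 0 ≤ cur) (g : List String)
    (m : List (List Bool)) (hm : pvShape Hn Wn m)
    (h2 : ∀ (r x : Nat), r < Hn → x < Wn → cur ≤ (x : Int) → pvGet2 m r x = false) :
    pvShape Hn Wn (pvCharWrite (Wn : Int) cur g m) ∧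
    ∀ (r x : Nat), r < Hn → x < Wn →
    pvGet2 (pvCharWrite (Wn : Int) cur g m) r x
      = if (x : Int) < cur then pvGet2 m r x
        else decide ((pvPieceG g (r : Int)).getD ((x : Int) - cur).toNat ' ' ≠ ' ') := by

  obtain ⟨hsh, hpt⟩ := pvRowsL Hn Wn cur hcur g 0 le_rfl m hm
  refine ⟨hsh, ?_⟩
  intro r x hr hx
  unfold pvCharWrite
  rw [hpt r x hr hx]
  have hrs : ((r : Int) - (0 : Int)).toNat = r := by omega
  rw [hrs]
  by_cases hxc : (x : Int) < cur
  · rw [if_neg (by rintro ⟨-, -, h1, -⟩; omega), if_pos hxc]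
  · rw [if_neg hxc]
    have hwlen : (PySem.Str.len (PySem.List.pyGetD g 0 "")).toNat
        = (PySem.List.pyGetD g 0 "").toList.length := by
      rw [PySem.Str.len_eq]; omega
    by_cases hrg : (r : Int) < (g.length : Int)
    · have hrow : pvRowOf g (r : Int) = (g.getD r "").toList := by
        unfold pvRowOf; rw [if_pos hrg, PySem.List.pyGetD_natCast]
      have hpiece : pvPieceG g (r : Int)
          = ((g.getD r "").toList ++
             List.replicate ((PySem.List.pyGetD g 0 "").toList.length - (g.getD r "").toList.length) ' ')
            ++ [' '] := by
        unfold pvPieceG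
        rw [hrow, hwlen]
      by_cases hkr : ((x : Int) - cur).toNat < (g.getD r "").toList.length
      · have hget : (pvPieceG g (r : Int)).getD ((x : Int) - cur).toNat ' '
            = (g.getD r "").toList.getD ((x : Int) - cur).toNat ' ' := by
          rw [hpiece, List.append_assoc, List.getD_append _ _ _ _ hkr]
        rw [hget]
        have h2x := h2 r x hr hx (by omega)
        by_cases hbit : (g.getD r "").toList.getD ((x : Int) - cur).toNat ' ' ≠ ' '
        · rw [if_pos ⟨by omega, by omega, by omega, by omega, hbit⟩]
          exact (decide_eq_true hbit).symm
        · rw [if_neg (by rintro ⟨-, -, -, -, h5⟩; exact hbit h5), h2x]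
          simp only [ne_eq, not_not] at hbit
          rw [hbit]
          simp
      · have hget : (pvPieceG g (r : Int)).getD ((x : Int) - cur).toNat ' ' = ' ' := by
          rw [hpiece, List.append_assoc, List.getD_append_right _ _ _ _ (by omega)]
          apply pvGetD_blank
          intro y hy
          rcases List.mem_append.mp hy with hy | hy
          · exact List.eq_of_mem_replicate hy
          · simpa using hy
        rw [hget, if_neg (by rintro ⟨-, -, -, h4, -⟩; omega), h2 r x hr hx (by omega)]
        simp
    · rw [if_neg (by rintro ⟨-, h1, -⟩; omega)]
      have hget : (pvPieceG g (r : Int)).getD ((x : Int) - cur).toNat ' ' = ' ' := by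
        unfold pvPieceG pvRowOf
        rw [if_neg hrg]
        apply pvGetD_blank
        intro y hy
        rcases List.mem_append.mp hy with hy | hy
        · rcases List.mem_append.mp hy with hy | hy
          · simp at hy
          · exact List.eq_of_mem_replicate hy
        · simpa using hy
      rw [hget, h2 r x hr hx (by omega)]
      simp

-- piece facts under the precondition
lemma pvPieceG_length (g : List String) (r : Int) (hr : 0 ≤ r)
    (hrows : ∀ s ∈ g, s.toList.length ≤ (PySem.List.pyGetD g 0 "").toList.length) :
    ((pvPieceG g r).length : Int) = PySem.Str.len (PySem.List.pyGetD g 0 "") + 1 := by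

  have hw : PySem.Str.len (PySem.List.pyGetD g 0 "")
      = (((PySem.List.pyGetD g 0 "").toList.length : Nat) : Int) := by
    rw [PySem.Str.len_eq]
  unfold pvPieceG pvRowOf
  by_cases hrg : r < (g.length : Int)
  · rw [if_pos hrg]
    have hreq : r = ((r.toNat : Nat) : Int) := by omega
    have hlt : r.toNat < g.length := by omega
    rw [hreq, PySem.List.pyGetD_natCast]
    have hmem : g.getD r.toNat "" ∈ g := by
      rw [List.getD_eq_getElem _ _ hlt]
      exact List.getElem_mem hlt
    have hle := hrows _ hmem
    simp only [List.length_append, List.length_replicate, List.length_cons, List.length_nil]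
    rw [hw]
    omega
  · rw [if_neg hrg]
    simp only [List.length_append, List.length_replicate, List.length_cons, List.length_nil,
      List.nil_append]
    rw [hw]
    omega

-- the width accumulator advances by exactly the piece length
lemma pvWidthStep_piece (f : PySem.Dict String (List String)) (Hn : Nat) (c : Char)
    (hc : pvPreC f Hn c = true) (r : Int) (hr : 0 ≤ r) (acc : Int) :
    pvWidthStep f acc c = acc + ((pvPiece f r c).length : Int) := by

  cases hfc : f.get? (String.ofList [c]) with
  | none =>
    unfold pvWidthStep pvPiece
    rw [hfc]
    simp
  | some g =>
    have hc' : (!g.isEmpty && decide (g.length ≤ Hn) &&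
        g.all (fun s => decide (s.toList.length ≤ (PySem.List.pyGetD g 0 "").toList.length))) = true := by
      unfold pvPreC at hc
      rw [hfc] at hc
      exact hc
    have hg : g ≠ [] := by rintro rfl; simp at hc'
    simp only [Bool.and_eq_true, decide_eq_true_eq, List.all_eq_true] at hc'
    unfold pvWidthStep pvPiece
    rw [hfc]
    show acc + PySem.Str.len (PySem.List.pyGetD g 0 "") + 1 = acc + ((pvPieceG g r).length : Int)
    rw [pvPieceG_length g r hr (fun s hs => hc'.2 s hs)]
    ring

-- total line length = A's width accumulator
lemma pvLineLen (f : PySem.Dict String (List String)) (Hn : Nat) (cs : List Char)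
    (hcs : cs.all (pvPreC f Hn) = true) (r : Int) (hr : 0 ≤ r) :
    ∀ acc : Int, cs.foldl (pvWidthStep f) acc = acc + ((cs.flatMap (pvPiece f r)).length : Int) := by
    induction cs with
  | nil => intro acc; simp
  | cons c cs ih =>
    simp only [List.all_cons, Bool.and_eq_true] at hcs
    intro acc
    simp only [List.foldl_cons, List.flatMap_cons, List.length_append]
    rw [ih hcs.2, pvWidthStep_piece f Hn c hcs.1 r hr acc]
    push_cast
    ring

-- main loop: A's mask agrees pointwise with B's row lines
lemma pvMainL (f : PySem.Dict String (List String)) (Hn Wn : Nat) (cs : List Char) :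
    ∀ (cur : Int), 0 ≤ cur → ∀ m, pvShape Hn Wn m → cs.all (pvPreC f Hn) = true →
    (∀ (r x : Nat), r < Hn → x < Wn → cur ≤ (x : Int) → pvGet2 m r x = false) →
    pvShape Hn Wn (cs.foldl (pvAStep f (Wn : Int)) (m, cur)).1 ∧
    ∀ (r x : Nat), r < Hn → x < Wn →
    pvGet2 (cs.foldl (pvAStep f (Wn : Int)) (m, cur)).1 r x
      = if (x : Int) < cur then pvGet2 m r x
        else decide ((cs.flatMap (pvPiece f (r : Int))).getD ((x : Int) - cur).toNat ' ' ≠ ' ') := by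
    induction cs with
  | nil =>
    intro cur hcur m hm hall h2
    refine ⟨hm, ?_⟩
    intro r x hr hx
    simp only [List.foldl_nil, List.flatMap_nil, List.getD_nil]
    by_cases hxc : (x : Int) < cur
    · rw [if_pos hxc]
    · rw [if_neg hxc, h2 r x hr hx (by omega)]
      simp
  | cons c cs ih =>
    intro cur hcur m hm hall h2
    simp only [List.all_cons, Bool.and_eq_true] at hall
    simp only [List.foldl_cons, List.flatMap_cons]
    cases hfc : f.get? (String.ofList [c]) with
    | none =>
      have hstep : pvAStep f (Wn : Int) (m, cur) c = (m, cur + 2) := by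
        unfold pvAStep; rw [hfc]
      rw [hstep]
      have h2' : ∀ (r x : Nat), r < Hn → x < Wn → cur + 2 ≤ (x : Int) → pvGet2 m r x = false :=
        fun r x hr hx hxc => h2 r x hr hx (by omega)
      obtain ⟨hsh, hpt⟩ := ih (cur + 2) (by omega) m hm hall.2 h2'
      refine ⟨hsh, ?_⟩
      intro r x hr hx
      rw [hpt r x hr hx]
      have hpc : pvPiece f (r : Int) c = [' ', ' '] := by unfold pvPiece; rw [hfc]
      rw [hpc]
      by_cases hx0 : (x : Int) < cur
      · rw [if_pos (by omega), if_pos hx0]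
      · rw [if_neg hx0]
        by_cases hx2 : (x : Int) < cur + 2
        · rw [if_pos hx2, h2 r x hr hx (by omega)]
          have : ([' ', ' '] ++ cs.flatMap (pvPiece f (r : Int))).getD ((x : Int) - cur).toNat ' ' = ' ' := by
            rw [List.getD_append _ _ _ _ (by simp; omega)]
            apply pvGetD_blank
            intro y hy; simpa using hy
          rw [this]
          simp
        · rw [if_neg (by omega)]
          rw [List.getD_append_right _ _ _ _ (by simp; omega)]
          have : ((x : Int) - cur).toNat - ([' ', ' '] : List Char).length = ((x : Int) - (cur + 2)).toNat := by
            simp; omega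
          rw [this]
    | some g =>
      have hPC := hall.1
      unfold pvPreC at hPC
      rw [hfc] at hPC
      have hg : g ≠ [] := by rintro rfl; simp at hPC
      simp only [Bool.and_eq_true, decide_eq_true_eq, List.all_eq_true] at hPC
      obtain ⟨⟨-, hH⟩, hrows'⟩ := hPC
      have hall2 := hall.2
      have hrows : ∀ s ∈ g, s.toList.length ≤ (PySem.List.pyGetD g 0 "").toList.length :=
        fun s hs => hrows' s hs
      set w := PySem.Str.len (PySem.List.pyGetD g 0 "") with hw
      have hwnn : 0 ≤ w := by rw [hw, PySem.Str.len_eq]; positivity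
      have hstep : pvAStep f (Wn : Int) (m, cur) c = (pvCharWrite (Wn : Int) cur g m, cur + w + 1) := by
        unfold pvAStep
        rw [hfc]
        dsimp only
        rw [if_pos hg, ← hw]
      rw [hstep]
      obtain ⟨hsh1, hpt1⟩ := pvCharL Hn Wn cur hcur g m hm h2
      have hplen : ∀ r : Nat, (pvPieceG g (r : Int)).length = w.toNat + 1 := by
        intro r
        have := pvPieceG_length g (r : Int) (by omega) hrows
        rw [← hw] at this
        omega
      have h2' : ∀ (r x : Nat), r < Hn → x < Wn → cur + w + 1 ≤ (x : Int) →
          pvGet2 (pvCharWrite (Wn : Int) cur g m) r x = false := by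
        intro r x hr hx hxc
        rw [hpt1 r x hr hx, if_neg (by omega)]
        have : (pvPieceG g (r : Int)).getD ((x : Int) - cur).toNat ' ' = ' ' := by
          rw [List.getD_eq_getElem?_getD, List.getElem?_eq_none_iff.mpr (by rw [hplen r]; omega)]
          rfl
        rw [this]
        simp
      obtain ⟨hsh, hpt⟩ := ih (cur + w + 1) (by omega) _ hsh1 hall2 h2'
      refine ⟨hsh, ?_⟩
      intro r x hr hx
      rw [hpt r x hr hx]
      have hpc : pvPiece f (r : Int) c = pvPieceG g (r : Int) := by unfold pvPiece; rw [hfc]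
      rw [hpc]
      by_cases hx0 : (x : Int) < cur
      · rw [if_pos (by omega), hpt1 r x hr hx, if_pos hx0, if_pos hx0]
      · rw [if_neg hx0]
        by_cases hxw : (x : Int) < cur + w + 1
        · rw [if_pos hxw, hpt1 r x hr hx, if_neg hx0]
          rw [List.getD_append _ _ _ _ (by rw [hplen r]; omega)]
        · rw [if_neg hxw]
          rw [List.getD_append_right _ _ _ _ (by rw [hplen r]; omega)]
          have : ((x : Int) - cur).toNat - (pvPieceG g (r : Int)).length = ((x : Int) - (cur + w + 1)).toNat := by
            rw [hplen r]; omega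
          rw [this]

-- ===== VERDICT (by name: the statement is the Claim_ definition above) =====
theorem get_text_mask_spec : Claim_equal_get_text_mask := by
  intro text font _ hpre
  unfold Spec_get_text_mask get_text_mask get_text_mask_alt
  set f := PySem.Dict.mk (font.getD pvFONT) with hf
  set cs := text.toList with hcs
  set Hn := (f.getD "0" ["", "", "", "", ""]).length with hHn
  have hall : cs.all (pvPreC f Hn) = true := hpre
  have hWnn : 0 ≤ pvTextWidth cs f := le_max_left 0 _
  set Wn := (pvTextWidth cs f).toNat with hWn
  have hWiW : pvTextWidth cs f = (Wn : Int) := (Int.toNat_of_nonneg hWnn).symm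
  have hHt : (pvTextHeight f).toNat = Hn := by rw [pvTextHeight]; exact Int.toNat_natCast _
  have hminit : pvShape Hn Wn (List.replicate Hn (List.replicate Wn false)) := by
    refine ⟨by simp, ?_⟩
    intro row hmem
    rw [List.eq_of_mem_replicate hmem]
    simp
  have h2init : ∀ (r x : Nat), r < Hn → x < Wn → (0 : Int) ≤ (x : Int) →
      pvGet2 (List.replicate Hn (List.replicate Wn false)) r x = false := by
    intro r x hr hx _
    simp [pvGet2, List.getD_eq_getElem?_getD, hr, hx]
  have hmax : max 0 (cs.foldl (pvWidthStep f) 0 - 1) = (Wn : Int) := by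
    rw [← hWiW]; rfl
  obtain ⟨⟨hlenA, hrowA⟩, hpt⟩ := pvMainL f Hn Wn cs 0 le_rfl _ hminit hall h2init
  show (List.foldl (pvAStep f (pvTextWidth cs f))
      (List.replicate (pvTextHeight f).toNat (List.replicate (pvTextWidth cs f).toNat false), 0) cs).1
    = List.map _ (PySem.List.pyRange 0 ((Hn : Int)) 1)
  rw [hHt, hWiW, Int.toNat_natCast]
  apply List.ext_getElem
  · rw [hlenA]
    simp [PySem.List.length_pyRange_one]
  · intro r h1 h2
    simp only [List.getElem_map, PySem.List.getElem_pyRange_one, zero_add]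
    have hrH : r < Hn := hlenA ▸ h1
    have hlineT : (((cs.flatMap (pvPiece f (r : Int))).length : Int)) = cs.foldl (pvWidthStep f) 0 := by
      have := pvLineLen f Hn cs hall (r : Int) (by omega) 0
      omega
    have hWline : Wn = (cs.flatMap (pvPiece f (r : Int))).length - 1 := by omega
    have hrowlen : (List.foldl (pvAStep f ((Wn : Nat) : Int))
        (List.replicate Hn (List.replicate Wn false), 0) cs).1[r].length = Wn :=
      hrowA _ (List.getElem_mem h1)
    apply List.ext_getElem
    · rw [hrowlen]
      simp only [List.length_map, List.length_take]
      omega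
    · intro x hx1 hx2
      have hxW : x < Wn := by rw [hrowlen] at hx1; exact hx1
      have hxline : x < (cs.flatMap (pvPiece f (r : Int))).length := by omega
      have hgm : (List.foldl (pvAStep f ((Wn : Nat) : Int))
          (List.replicate Hn (List.replicate Wn false), 0) cs).1[r][x]
          = pvGet2 (List.foldl (pvAStep f ((Wn : Nat) : Int))
              (List.replicate Hn (List.replicate Wn false), 0) cs).1 r x := by
        rw [pvGet2, List.getD_eq_getElem _ _ h1, List.getD_eq_getElem _ _ hx1]
      rw [hgm, hpt r x hrH hxW, if_neg (by omega)]
      simp only [List.getElem_map, List.getElem_take, sub_zero, Int.toNat_natCast]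
      rw [List.getD_eq_getElem _ ' ' hxline]
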